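-- pv_equiv track=rewrite | github.com/steelx/kb-mouse-control | screen.py | find_nearest_point_in_direction
-- ===== SOURCE A (Python) =====
-- def find_nearest_point_in_direction(current_pos, action_points, direction):
--     x, y = current_pos
--     valid_points = []
--
--     for point in action_points:
--         px, py = point
--         if direction == 'up' and py < y:
--             valid_points.append(point)
--         elif direction == 'down' and py > y:
--             valid_points.append(point)
--         elif direction == 'left' and px < x:
--             valid_points.append(point)
--         elif direction == 'right' and px > x:
--             valid_points.append(point)
--
--     if not valid_points:
--         # If no points in the exact direction, consider points slightly off
--         for point in action_points:
--             px, py = point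
--             if direction in ['up', 'down'] and abs(px - x) < 50:
--                 valid_points.append(point)
--             elif direction in ['left', 'right'] and abs(py - y) < 50:
--                 valid_points.append(point)
--
--     if valid_points:
--         return min(valid_points, key=lambda p: ((p[0]-x)**2 + (p[1]-y)**2)**0.5)
--     return None
-- ===== SOURCE B (Python) =====
-- def find_nearest_point_in_direction(current_pos, action_points, direction):
--     x, y = current_pos
--     vertical = direction in ('up', 'down')
--     horizontal = direction in ('left', 'right')
--     best_strict = None   # (point, dist) with smallest dist among strict-direction points
--     best_approx = None   # same among slightly-off-axis points
--     for point in action_points: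
--         px, py = point
--         dist = ((px - x) ** 2 + (py - y) ** 2) ** 0.5
--         if (direction == 'up' and py < y) or (direction == 'down' and py > y) \
--            or (direction == 'left' and px < x) or (direction == 'right' and px > x):
--             if best_strict is None or dist < best_strict[1]:
--                 best_strict = (point, dist)
--         if (vertical and abs(px - x) < 50) or (horizontal and abs(py - y) < 50):
--             if best_approx is None or dist < best_approx[1]:
--                 best_approx = (point, dist)
--     if best_strict is not None:
--         return best_strict[0]
--     if best_approx is not None:
--         return best_approx[0]
--     return None
-- ===== Notes on version B (the rewrite author's own statement) =====
-- stated objective: alternative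
-- what changed: A materialises a filtered list (a second filtering pass over all points if the first found none) and then runs min over it; B makes one pass over action_points keeping two running (best point, best distance) accumulators - one for the strict direction test, one for the slightly-off-axis test - updated on strictly smaller distance so first-encountered minima win exactly as min does, and returns the strict best, else the approximate best, else None.
import Mathlib
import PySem

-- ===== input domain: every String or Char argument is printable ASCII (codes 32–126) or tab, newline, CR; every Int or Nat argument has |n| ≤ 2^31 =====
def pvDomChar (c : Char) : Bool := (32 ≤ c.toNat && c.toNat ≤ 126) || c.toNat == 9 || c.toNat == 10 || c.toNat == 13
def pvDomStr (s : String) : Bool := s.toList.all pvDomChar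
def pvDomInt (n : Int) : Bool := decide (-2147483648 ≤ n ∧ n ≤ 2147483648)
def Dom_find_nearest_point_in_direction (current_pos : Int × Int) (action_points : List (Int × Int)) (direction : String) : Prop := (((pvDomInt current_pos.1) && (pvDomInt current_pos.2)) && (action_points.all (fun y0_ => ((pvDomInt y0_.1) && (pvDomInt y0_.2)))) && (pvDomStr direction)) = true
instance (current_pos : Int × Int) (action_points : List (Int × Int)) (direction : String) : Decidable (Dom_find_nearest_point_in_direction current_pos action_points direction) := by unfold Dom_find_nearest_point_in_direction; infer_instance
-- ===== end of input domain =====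

-- B replaces A's two filtering passes + a min pass over a materialised list by ONE pass that
-- keeps two running (best point, best distance) accumulators (strict direction / slightly off-axis).
-- Both Pythons compare points by the float key ((px-x)**2+(py-y)**2)**0.5; the helpers below model
-- that key exactly on the stated domain (|coordinates| ≤ 2^31): the IEEE-754 double nearest to the
-- integer squared distance, its correctly rounded double square root, scaled by 2^52 into a Nat.
-- Both ports use this shared key model, exactly as both Pythons evaluate the same key expression.

-- round a nonnegative integer to the nearest IEEE double (53-bit significand, ties to even); exact value as a Nat
def pvRoundDouble (n : Nat) : Nat :=
  if n < 2 ^ 53 then n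
  else
    let k := n.log2 + 1 - 53
    let q := n / 2 ^ k
    let r := n % 2 ^ k
    let half := 2 ^ (k - 1)
    (if half < r ∨ (r = half ∧ q % 2 = 1) then q + 1 else q) * 2 ^ k

-- correctly rounded double sqrt of (pvRoundDouble n), times 2^52 (an exact Nat; order-isomorphic to the float;
-- exact for n up to 2^65, which covers every squared distance the domain admits; no rounding ties exist there)
def pvSqrtKey (n : Nat) : Nat :=
  if n = 0 then 0
  else
    let s := pvRoundDouble n
    let k := s.log2 / 2                 -- sqrt s ∈ [2^k, 2^(k+1))
    let N := s * 2 ^ (2 * (52 - k))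
    let m := N.sqrt
    (if m * m + m < N then m + 1 else m) * 2 ^ k

-- the Python key lambda ((p[0]-x)**2 + (p[1]-y)**2)**0.5 (the sum of squares is ≥ 0, so .toNat is exact)
def pvDistKey (x y : Int) (p : Int × Int) : Nat :=
  pvSqrtKey ((p.1 - x) ^ 2 + (p.2 - y) ^ 2).toNat

-- ===== PORT A =====
def find_nearest_point_in_direction (current_pos : Int × Int) (action_points : List (Int × Int)) (direction : String) : Option (Int × Int) :=
  let x := current_pos.1
  let y := current_pos.2
  let valid_points : List (Int × Int) := []
  let valid_points := action_points.foldl (fun acc point =>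
    if direction == "up" && decide (point.2 < y) then acc ++ [point]
    else if direction == "down" && decide (point.2 > y) then acc ++ [point]
    else if direction == "left" && decide (point.1 < x) then acc ++ [point]
    else if direction == "right" && decide (point.1 > x) then acc ++ [point]
    else acc) valid_points
  let valid_points := if valid_points = [] then
      action_points.foldl (fun acc point =>
        if (direction == "up" || direction == "down") && decide (|point.1 - x| < 50) then acc ++ [point]
        else if (direction == "left" || direction == "right") && decide (|point.2 - y| < 50) then acc ++ [point]
        else acc) valid_points
    else valid_points
  -- 'if valid_points: return min(valid_points, key=…)  return None' = first minimum, none on []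
  PySem.List.min? valid_points (pvDistKey x y)

-- ===== PORT B =====
def find_nearest_point_in_direction_alt (current_pos : Int × Int) (action_points : List (Int × Int)) (direction : String) : Option (Int × Int) :=
  let x := current_pos.1
  let y := current_pos.2
  let vertical := direction == "up" || direction == "down"
  let horizontal := direction == "left" || direction == "right"
  let r := action_points.foldl (fun (best : Option ((Int × Int) × Nat) × Option ((Int × Int) × Nat)) point =>
      let dist := pvDistKey x y point
      (if direction == "up" && decide (point.2 < y) || direction == "down" && decide (point.2 > y)
          || direction == "left" && decide (point.1 < x) || direction == "right" && decide (point.1 > x) then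
         match best.1 with
         | none => some (point, dist)
         | some (_, d) => if dist < d then some (point, dist) else best.1
       else best.1,
       if vertical && decide (|point.1 - x| < 50) || horizontal && decide (|point.2 - y| < 50) then
         match best.2 with
         | none => some (point, dist)
         | some (_, d) => if dist < d then some (point, dist) else best.2
       else best.2)) (none, none)
  match r.1 with
  | some (p, _) => some p
  | none =>
    match r.2 with
    | some (p, _) => some p
    | none => none

-- ===== PRECONDITION & SPEC =====
def Spec_find_nearest_point_in_direction (current_pos : Int × Int) (action_points : List (Int × Int)) (direction : String) (out : Option (Int × Int)) : Prop := out = find_nearest_point_in_direction_alt current_pos action_points direction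
instance (current_pos : Int × Int) (action_points : List (Int × Int)) (direction : String) (out : Option (Int × Int)) : Decidable (Spec_find_nearest_point_in_direction current_pos action_points direction out) := by unfold Spec_find_nearest_point_in_direction; infer_instance

-- ===== CLAIM (what is proved, stated in full; the proofs are below) =====
def Claim_equal_find_nearest_point_in_direction : Prop := ∀ (current_pos : Int × Int) (action_points : List (Int × Int)) (direction : String), Dom_find_nearest_point_in_direction current_pos action_points direction → Spec_find_nearest_point_in_direction current_pos action_points direction (find_nearest_point_in_direction current_pos action_points direction)

-- ===== LEMMAS AND PROOFS =====

-- the running-minimum step B performs on one accumulator (with the key cached in the state)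
def pvStep {α : Type} (key : α → Nat) (acc : Option (α × Nat)) (p : α) : Option (α × Nat) :=
  match acc with
  | none => some (p, key p)
  | some (_, d) => if key p < d then some (p, key p) else acc

-- A's 4-branch elif append loop is a filter by the disjunction of the four tests
theorem pv_foldl_elif4_filter {α : Type} (c1 c2 c3 c4 : α → Bool) (xs : List α) (acc : List α) :
    xs.foldl (fun acc p =>
      if c1 p then acc ++ [p]
      else if c2 p then acc ++ [p]
      else if c3 p then acc ++ [p]
      else if c4 p then acc ++ [p]
      else acc) acc = acc ++ xs.filter (fun p => c1 p || c2 p || c3 p || c4 p) := by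
  have h : (fun (acc : List α) p =>
      if c1 p then acc ++ [p]
      else if c2 p then acc ++ [p]
      else if c3 p then acc ++ [p]
      else if c4 p then acc ++ [p]
      else acc) = fun acc p => if c1 p || c2 p || c3 p || c4 p then acc ++ [p] else acc := by
    funext acc p
    cases c1 p <;> cases c2 p <;> cases c3 p <;> cases c4 p <;> simp
  rw [h, PySem.List.foldl_append_if_eq_filter]

-- A's 2-branch elif append loop is a filter by the disjunction of the two tests
theorem pv_foldl_elif2_filter {α : Type} (c1 c2 : α → Bool) (xs : List α) (acc : List α) :
    xs.foldl (fun acc p =>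
      if c1 p then acc ++ [p]
      else if c2 p then acc ++ [p]
      else acc) acc = acc ++ xs.filter (fun p => c1 p || c2 p) := by
  have h : (fun (acc : List α) p =>
      if c1 p then acc ++ [p]
      else if c2 p then acc ++ [p]
      else acc) = fun acc p => if c1 p || c2 p then acc ++ [p] else acc := by
    funext acc p
    cases c1 p <;> cases c2 p <;> simp
  rw [h, PySem.List.foldl_append_if_eq_filter]

-- B's one pass over the pair of accumulators = the two filtered single-accumulator passes
theorem pv_foldl_pair (key : (Int × Int) → Nat) (ps qs : (Int × Int) → Bool) :
    ∀ (xs : List (Int × Int)) (s a : Option ((Int × Int) × Nat)),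
    xs.foldl (fun (best : Option ((Int × Int) × Nat) × Option ((Int × Int) × Nat)) point =>
      (if ps point then
         match best.1 with
         | none => some (point, key point)
         | some (_, d) => if key point < d then some (point, key point) else best.1
       else best.1,
       if qs point then
         match best.2 with
         | none => some (point, key point)
         | some (_, d) => if key point < d then some (point, key point) else best.2
       else best.2)) (s, a)
      = ((xs.filter ps).foldl (pvStep key) s, (xs.filter qs).foldl (pvStep key) a) := by
  intro xs
  induction xs with
  | nil => intro s a; simp
  | cons p t ih =>
    intro s a
    simp only [List.foldl_cons, List.filter_cons]
    cases ps p <;> cases qs p <;> simp [ih, pvStep] <;>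
      first
        | rfl
        | (cases a <;> rfl)
        | (cases s <;> rfl)
        | (constructor <;> first | rfl | (cases a <;> rfl) | (cases s <;> rfl))

-- the cached-key running minimum tracks PySem.List.min?'s loop
theorem pv_step_min (key : (Int × Int) → Nat) :
    ∀ (xs : List (Int × Int)) (m : Option (Int × Int)),
    xs.foldl (pvStep key) (m.map fun q => (q, key q))
      = (xs.foldl (fun acc x =>
          match acc with
          | none => some x
          | some m => if key x < key m then some x else some m) m).map (fun q => (q, key q)) := by
  intro xs
  induction xs with
  | nil => intro m; simp
  | cons p t ih =>
    intro m
    cases m with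
    | none =>
      simp only [List.foldl_cons, Option.map_none]
      have : pvStep key none p = (Option.map (fun q => (q, key q)) (some p)) := rfl
      rw [this, ih]
    | some q =>
      simp only [List.foldl_cons, Option.map_some]

      by_cases h : key p < key q
      · have : pvStep key (some (q, key q)) p = (Option.map (fun q => (q, key q)) (some p)) := by
          simp [pvStep, h]
        rw [this, ih, if_pos h]
      · have : pvStep key (some (q, key q)) p = (Option.map (fun q => (q, key q)) (some q)) := by
          simp [pvStep, h]
        rw [this, ih, if_neg h]

-- from the empty accumulator the running minimum is min? with the key attached
theorem pv_fold_step_none (key : (Int × Int) → Nat) (xs : List (Int × Int)) :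
    xs.foldl (pvStep key) none = (PySem.List.min? xs key).map (fun q => (q, key q)) := by
  have h := pv_step_min key xs none
  simp only [Option.map_none] at h
  unfold PySem.List.min?
  convert h using 2
  congr 1
  funext acc x
  cases acc with
  | none => rfl
  | some mm => exact if_congr Iff.rfl rfl rfl

-- ===== VERDICT (by name: the statement is the Claim_ definition above) =====
theorem find_nearest_point_in_direction_spec : Claim_equal_find_nearest_point_in_direction := by
  intro cp aps dir _h
  unfold Spec_find_nearest_point_in_direction
  unfold find_nearest_point_in_direction find_nearest_point_in_direction_alt
  simp only []
  rw [pv_foldl_elif4_filter, pv_foldl_elif2_filter]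
  simp only [List.nil_append]
  rw [pv_foldl_pair (pvDistKey cp.1 cp.2)
      (fun point => dir == "up" && decide (point.2 < cp.2) || dir == "down" && decide (point.2 > cp.2)
        || dir == "left" && decide (point.1 < cp.1) || dir == "right" && decide (point.1 > cp.1))
      (fun point => (dir == "up" || dir == "down") && decide (|point.1 - cp.1| < 50)
        || (dir == "left" || dir == "right") && decide (|point.2 - cp.2| < 50)) aps none none]
  rw [pv_fold_step_none, pv_fold_step_none]
  generalize List.filter (fun point => dir == "up" && decide (point.2 < cp.2) || dir == "down" && decide (point.2 > cp.2)
        || dir == "left" && decide (point.1 < cp.1) || dir == "right" && decide (point.1 > cp.1)) aps = S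
  generalize List.filter (fun point => (dir == "up" || dir == "down") && decide (|point.1 - cp.1| < 50)
        || (dir == "left" || dir == "right") && decide (|point.2 - cp.2| < 50)) aps = Q
  cases hm : PySem.List.min? S (pvDistKey cp.1 cp.2) with
  | none =>
    have hS : S = [] := (PySem.List.min?_eq_none_iff S (pvDistKey cp.1 cp.2)).mp hm
    subst hS
    simp only [List.nil_append, Option.map_none]
    cases hq : PySem.List.min? Q (pvDistKey cp.1 cp.2) <;> simp [hq]
  | some m =>
    have hS : S ≠ [] := by
      intro h0
      rw [(PySem.List.min?_eq_none_iff S (pvDistKey cp.1 cp.2)).mpr h0] at hm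
      exact absurd hm (by simp)
    rw [if_neg hS, hm]
    rfl
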